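-- pv_equiv track=rewrite | github.com/cristianjs19/codefights-solutions-Python | The Core/56 - htmlEndByStartTag/htmlEndByStartTag.py | htmlEndTagByStartTag
-- ===== SOURCE A (Python) =====
-- def htmlEndTagByStartTag(startTag):
--     tag = ""
--
--     for i in startTag:
--         if i not in (' ', '>'):
--             tag += i
--         else:
--             break
--
--     tag = list(tag)
--     tag.insert(1, "/")
--     tag.append(">")
--
--     return "".join(tag)
-- ===== SOURCE B (Python) =====
-- def htmlEndTagByStartTag(startTag):
--     cut = len(startTag)
--     sp = startTag.find(' ')
--     if sp != -1:
--         cut = sp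
--     gt = startTag.find('>')
--     if gt != -1 and gt < cut:
--         cut = gt
--     prefix = startTag[:cut]
--     return prefix[:1] + '/' + prefix[1:] + '>'
-- ===== Notes on version B (the rewrite author's own statement) =====
-- stated objective: simpler
-- what changed: Replaces A's char-by-char accumulation loop with break plus the list/insert/append/join mutation by a closed-form build: locate the cut as the earliest space or tag-close via str.find, slice the prefix once, and concatenate first-char + slash + rest + close.
import Mathlib
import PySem

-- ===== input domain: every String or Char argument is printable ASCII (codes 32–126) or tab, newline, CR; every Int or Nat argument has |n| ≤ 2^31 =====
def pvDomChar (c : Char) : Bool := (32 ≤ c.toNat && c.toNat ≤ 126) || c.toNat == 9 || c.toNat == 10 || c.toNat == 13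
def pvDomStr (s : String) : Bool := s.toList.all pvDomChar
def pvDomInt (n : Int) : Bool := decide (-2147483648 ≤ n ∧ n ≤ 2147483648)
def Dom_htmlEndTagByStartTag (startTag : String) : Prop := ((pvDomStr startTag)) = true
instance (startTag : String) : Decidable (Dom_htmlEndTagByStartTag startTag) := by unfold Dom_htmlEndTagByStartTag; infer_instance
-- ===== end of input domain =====

-- B replaces A's char-by-char accumulation loop plus list-mutation (insert/append) by a
-- closed-form build: locate the cut with str.find, slice the prefix once, concatenate. Objective: simpler.

-- ===== PORT A =====
-- the for-loop with break, accumulating tag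
def pvTagLoop (chars : List Char) (tag : String) : String :=
  match chars with
  | [] => tag
  | c :: rest => if ¬ (c = ' ' ∨ c = '>') then pvTagLoop rest (tag.push c) else tag

def htmlEndTagByStartTag (startTag : String) : String :=
  let tag := pvTagLoop startTag.toList ""
  let tagL := PySem.List.insert tag.toList 1 '/'
  let tagL2 := tagL ++ ['>']
  String.ofList tagL2

-- ===== PORT B =====
def htmlEndTagByStartTag_alt (startTag : String) : String :=
  let cut0 : Int := PySem.Str.len startTag
  let sp := PySem.Str.find startTag " "
  let cut1 := if sp ≠ -1 then sp else cut0
  let gt := PySem.Str.find startTag ">"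
  let cut := if gt ≠ -1 ∧ gt < cut1 then gt else cut1
  let pre := PySem.Str.slice startTag none (some cut)
  PySem.Str.slice pre none (some 1) ++ "/" ++ PySem.Str.slice pre (some 1) none ++ ">"

-- ===== PRECONDITION & SPEC =====
def Spec_htmlEndTagByStartTag (startTag : String) (out : String) : Prop := out = htmlEndTagByStartTag_alt startTag
instance (startTag : String) (out : String) : Decidable (Spec_htmlEndTagByStartTag startTag out) := by unfold Spec_htmlEndTagByStartTag; infer_instance

-- ===== CLAIM (what is proved, stated in full; the proofs are below) =====
def Claim_equal_htmlEndTagByStartTag : Prop := ∀ (startTag : String), Dom_htmlEndTagByStartTag startTag → Spec_htmlEndTagByStartTag startTag (htmlEndTagByStartTag startTag)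

-- ===== LEMMAS AND PROOFS =====

-- the keep-predicate of A's loop
def pvKeep (c : Char) : Bool := !(c == ' ' || c == '>')

theorem pvTagLoop_toList (l : List Char) (tag : String) :
    (pvTagLoop l tag).toList = tag.toList ++ l.takeWhile pvKeep := by
  induction l generalizing tag with
  | nil => simp [pvTagLoop]
  | cons c rest ih =>
    by_cases h : c = ' ' ∨ c = '>'
    · simp [pvTagLoop, h, List.takeWhile, pvKeep]
      rcases h with h | h <;> simp [h]
    · push Not at h
      simp [pvTagLoop, h, ih, pvKeep]

theorem pvFindGo_single (d : Char) (l : List Char) (k : Nat) :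
    PySem.Chars.find.go [d] l k =
      if l.any (· == d) then ((k + l.findIdx (· == d) : Nat) : Int) else -1 := by
  induction l generalizing k with
  | nil => simp [PySem.Chars.find.go]
  | cons c t ih =>
    by_cases h : c = d
    · simp [PySem.Chars.find.go, h, List.isPrefixOf, List.findIdx_cons]
    · have hbc : (d == c) = false := by simp [Ne.symm h]
      have hcb : (c == d) = false := by simp [h]
      simp only [PySem.Chars.find.go, List.isPrefixOf, hbc, Bool.false_and, ih,
        List.findIdx_cons, hcb, List.any_cons, Bool.false_or, cond_false]
      by_cases ha : t.any (· == d)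
      · simp [ha]
        ring
      · simp [ha]

theorem pvTakeWhile_len (l : List Char) :
    (l.takeWhile pvKeep).length = min (l.findIdx (· == ' ')) (l.findIdx (· == '>')) := by
  induction l with
  | nil => simp
  | cons c t ih =>
    by_cases h1 : c = ' '
    · simp [List.findIdx_cons, pvKeep, h1]
    · by_cases h2 : c = '>'
      · simp [List.findIdx_cons, pvKeep, h2]
      · have b1 : (c == ' ') = false := by simp [h1]
        have b2 : (c == '>') = false := by simp [h2]
        simp [List.findIdx_cons, pvKeep, b1, b2, ih]

theorem pvInsert_one (t : List Char) (v : Char) :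
    PySem.List.insert t 1 v = t.take 1 ++ v :: t.drop 1 := by
  cases t with
  | nil => simp [PySem.List.insert, PySem.List.sliceIndices]
  | cons c r =>
    have : ((1 : Nat) : Int) = (1 : Int) := by norm_num
    rw [← this, PySem.List.insert_natCast _ _ _ (by simp)]

-- ===== VERDICT (by name: the statement is the Claim_ definition above) =====
theorem htmlEndTagByStartTag_spec : Claim_equal_htmlEndTagByStartTag := by
  intro s _
  unfold Spec_htmlEndTagByStartTag htmlEndTagByStartTag htmlEndTagByStartTag_alt
  set l := s.toList with hl
  set i1 := l.findIdx (· == ' ') with hi1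
  set i2 := l.findIdx (· == '>') with hi2
  have h1le : i1 ≤ l.length := List.findIdx_le_length
  have h2le : i2 ≤ l.length := List.findIdx_le_length
  -- B's cut equals min i1 i2
  have hf1 : PySem.Str.find s " " =
      if l.any (· == ' ') then ((0 + i1 : Nat) : Int) else -1 := by
    simpa [PySem.Str.find, PySem.Chars.find] using pvFindGo_single ' ' l 0
  have hf2 : PySem.Str.find s ">" =
      if l.any (· == '>') then ((0 + i2 : Nat) : Int) else -1 := by
    simpa [PySem.Str.find, PySem.Chars.find] using pvFindGo_single '>' l 0
  have hn1 : ¬ l.any (· == ' ') → i1 = l.length := by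
    intro h; rw [hi1, List.findIdx_eq_length]
    intro x hx; by_contra hc
    exact h (List.any_eq_true.mpr ⟨x, hx, by simpa using hc⟩)
  have hn2 : ¬ l.any (· == '>') → i2 = l.length := by
    intro h; rw [hi2, List.findIdx_eq_length]
    intro x hx; by_contra hc
    exact h (List.any_eq_true.mpr ⟨x, hx, by simpa using hc⟩)
  have hcut1 : (if PySem.Str.find s " " ≠ -1 then PySem.Str.find s " " else PySem.Str.len s) = (i1 : Int) := by
    rw [hf1, PySem.Str.len_eq]
    by_cases h : l.any (· == ' ')
    · simp [h]
    · rw [if_neg (by simp [h])]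
      simp [hn1 h, hl, String.length_toList]
  have hcut : (if PySem.Str.find s ">" ≠ -1 ∧ PySem.Str.find s ">" < (if PySem.Str.find s " " ≠ -1 then PySem.Str.find s " " else PySem.Str.len s)
      then PySem.Str.find s ">"
      else (if PySem.Str.find s " " ≠ -1 then PySem.Str.find s " " else PySem.Str.len s)) = ((min i1 i2 : Nat) : Int) := by
    rw [hcut1, hf2]
    by_cases h : l.any (· == '>')
    · simp only [h, if_true]
      by_cases hlt : i2 < i1
      · rw [if_pos ⟨by omega, by push_cast; omega⟩]; push_cast; omega
      · rw [if_neg (by push_cast; omega)]; push_cast; omega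
    · have := hn2 h
      simp only [h]
      rw [if_neg (by simp)]
      push_cast; omega
  simp only
  rw [hcut]
  -- the prefix is A's takeWhile
  have hmin : min i1 i2 = (l.takeWhile pvKeep).length := (pvTakeWhile_len l).symm
  have hpre : PySem.List.slice s.toList none (some ((min i1 i2 : Nat) : Int)) = l.takeWhile pvKeep := by
    rw [PySem.List.slice_to_natCast, hmin, ← hl]
    exact ((List.prefix_iff_eq_take.mp (List.takeWhile_prefix _))).symm
  apply String.toList_inj.mp
  simp only [String.toList_append, PySem.Str.slice, String.toList_ofList,
    pvTagLoop_toList, pvInsert_one, PySem.Chars.slice]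
  rw [PySem.List.slice_to _ (by norm_num), PySem.List.slice_from _ (by norm_num)]
  rw [hpre]
  simp
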